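-- pv_equiv track=rewrite | github.com/Godric1201/dermaviduals-brand-analyzer | scoring.py | find_first_position
-- ===== SOURCE A (Python) =====
-- def normalize_text(text):
--     return (
--         str(text)
--         .lower()
--         .replace("-", " ")
--         .replace("–", " ")
--         .replace("—", " ")
--         .replace("’", "'")
--         .replace(".", "")
--         .replace(",", "")
--         .strip()
--     )
--
-- def brand_aliases(brand):
--     brand = str(brand).strip()
--
--     aliases = [
--         brand,
--         brand.lower(),
--         brand.replace("-", " "),
--         brand.replace("–", " "),
--         brand.replace("—", " "),
--         brand.replace("’", "'"),
--         brand.replace(".", ""),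
--         brand.replace("+", ""),
--     ]
--
--     cleaned = []
--     seen = set()
--
--     for alias in aliases:
--         alias = normalize_text(alias).strip()
--         if alias and alias not in seen:
--             seen.add(alias)
--             cleaned.append(alias)
--
--     return cleaned
--
-- def find_first_position(answer, brand):
--     answer_text = normalize_text(answer)
--     first_position = None
--
--     for alias in brand_aliases(brand):
--         pos = answer_text.find(alias)
--         if pos != -1:
--             if first_position is None or pos < first_position:
--                 first_position = pos
--
--     return first_position
-- ===== SOURCE B (Python) =====
-- def _norm_char(c):
--     # per-character form of normalize_text's replace chain (applied after lowering)
--     c = c.lower()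
--     if c in "-\u2013\u2014":
--         return " "
--     if c == "\u2019":
--         return "'"
--     if c in ".,":
--         return ""
--     return c
--
--
-- def find_first_position(answer, brand):
--     # normalize in one character pass instead of a chain of str.replace passes
--     text = "".join(_norm_char(c) for c in str(answer)).strip()
--     b = str(brand).strip()
--     n = "".join(_norm_char(c) for c in b).strip()
--     np = "".join(_norm_char(c) for c in b if c != "+").strip()
--     aliases = [a for a in dict.fromkeys((n, np)) if a]
--     # single left-to-right scan: first text position where any alias starts
--     for i in range(len(text)):
--         if any(text.startswith(a, i) for a in aliases):
--             return i
--     return None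
-- ===== Notes on version B (the rewrite author's own statement) =====
-- stated objective: alternative
-- what changed: A normalizes via a chain of whole-string str.replace passes, builds eight alias candidates and runs str.find once per alias keeping a running minimum; B normalizes in one per-character pass, exploits that seven of the eight candidates normalize identically (so only two candidates exist: the normalized brand and the normalized brand with '+' removed), and finds the answer position by a single left-to-right scan returning the first index where any alias starts.
import Mathlib
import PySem

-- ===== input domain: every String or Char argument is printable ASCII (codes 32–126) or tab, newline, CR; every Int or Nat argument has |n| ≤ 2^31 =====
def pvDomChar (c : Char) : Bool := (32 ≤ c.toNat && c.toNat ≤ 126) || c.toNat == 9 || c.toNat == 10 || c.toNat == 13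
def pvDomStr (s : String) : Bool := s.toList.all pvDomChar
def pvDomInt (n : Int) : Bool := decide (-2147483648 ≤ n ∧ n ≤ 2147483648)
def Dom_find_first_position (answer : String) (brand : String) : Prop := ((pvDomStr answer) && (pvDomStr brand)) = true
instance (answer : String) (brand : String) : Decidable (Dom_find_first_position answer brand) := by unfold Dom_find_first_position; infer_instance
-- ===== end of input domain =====

-- B normalizes in one per-character pass (instead of A's chain of whole-string
-- replace passes), keeps only the two distinct alias candidates (the normalized
-- brand and the normalized brand without '+'), and finds the position by a
-- single left-to-right scan (objective: alternative structure, same result).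

-- ===== PORT A =====
-- shared module helper: normalize_text
def normalize_text (text : String) : String :=
  PySem.Str.strip
    (PySem.Str.replace
      (PySem.Str.replace
        (PySem.Str.replace
          (PySem.Str.replace
            (PySem.Str.replace
              (PySem.Str.replace (PySem.Str.lower text) "-" " ")
              "–" " ")
            "—" " ")
          "’" "'")
        "." "")
      "," "")

-- shared module helper: brand_aliases (the loop carries (cleaned, seen))
def brand_aliases (brand : String) : List String :=
  let b := PySem.Str.strip brand
  let aliases : List String :=
    [b, PySem.Str.lower b,
     PySem.Str.replace b "-" " ",
     PySem.Str.replace b "–" " ",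
     PySem.Str.replace b "—" " ",
     PySem.Str.replace b "’" "'",
     PySem.Str.replace b "." "",
     PySem.Str.replace b "+" ""]
  (aliases.foldl
    (fun (st : List String × PySem.Set String) al0 =>
      let a := PySem.Str.strip (normalize_text al0)
      if a ≠ "" ∧ ¬ (PySem.Set.contains st.2 a = true) then
        (st.1 ++ [a], PySem.Set.add st.2 a)
      else st)
    ([], PySem.Set.empty)).1

def find_first_position (answer : String) (brand : String) : Option Int :=
  let answer_text := normalize_text answer
  (brand_aliases brand).foldl
    (fun first_position al0 =>
      let pos := PySem.Str.find answer_text al0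
      if pos ≠ -1 then
        match first_position with
        | none => some pos
        | some fp => if pos < fp then some pos else first_position
      else first_position)
    none

-- ===== PORT B =====
-- Source B's _norm_char: lower the character, then the per-character replace table
def pvNormChar (c : Char) : List Char :=
  let c := PySem.Chars.lowerChar c
  if c = '-' ∨ c = '–' ∨ c = '—' then [' ']
  else if c = '’' then ['\'']
  else if c = '.' ∨ c = ',' then []
  else [c]

-- Source B's ''.join(_norm_char(c) for c in s).strip()
def pvNorm (s : List Char) : List Char :=
  PySem.Chars.strip (s.flatMap pvNormChar)

-- Source B's scan loop: first position i at which some alias starts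
def pvScan (aliases : List (List Char)) (t : List Char) (i : Int) : Option Int :=
  match t with
  | [] => none
  | c :: rest =>
      if aliases.any (fun a => a.isPrefixOf (c :: rest)) then some i
      else pvScan aliases rest (i + 1)

def find_first_position_alt (answer : String) (brand : String) : Option Int :=
  let text := pvNorm answer.toList
  let b := PySem.Chars.strip brand.toList
  let n := pvNorm b
  let np := pvNorm (b.filter (· ≠ '+'))
  let aliases := (PySem.List.dedup [n, np]).filter (· ≠ [])
  pvScan aliases text 0

-- ===== PRECONDITION & SPEC =====
def Spec_find_first_position (answer : String) (brand : String) (out : Option Int) : Prop := out = find_first_position_alt answer brand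
instance (answer : String) (brand : String) (out : Option Int) : Decidable (Spec_find_first_position answer brand out) := by unfold Spec_find_first_position; infer_instance

-- ===== CLAIM (what is proved, stated in full; the proofs are below) =====
def Claim_equal_find_first_position : Prop := ∀ (answer : String) (brand : String), Dom_find_first_position answer brand → Spec_find_first_position answer brand (find_first_position answer brand)

-- ===== LEMMAS AND PROOFS =====

lemma pv_go_single (c : Char) (new : List Char) :
    ∀ (l : List Char) (fuel : Nat) (acc : List Char), l.length ≤ fuel →
    PySem.Chars.replace.go [c] new fuel l acc
      = acc.reverse ++ l.flatMap (fun x => if x = c then new else [x]) := by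
  intro l
  induction l with
  | nil =>
      intro fuel acc h
      cases fuel <;> simp [PySem.Chars.replace.go]
  | cons x t ih =>
      intro fuel acc h
      cases fuel with
      | zero => simp at h
      | succ f =>
          simp only [PySem.Chars.replace.go]
          by_cases hx : x = c
          · subst hx
            rw [if_pos (by simp [List.isPrefixOf])]
            simp only [List.length_cons] at h
            simp only [List.length_cons, List.length_nil, List.drop_succ_cons, List.drop_zero]
            rw [ih f (new.reverse ++ acc) (by omega)]
            simp
          · rw [if_neg (by simp [List.isPrefixOf]; exact fun hc => absurd hc.symm hx)]
            simp only [List.length_cons] at h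
            rw [ih f (x :: acc) (by omega)]
            simp [hx]

lemma pv_replace_single (s : List Char) (c : Char) (new : List Char) :
    PySem.Chars.replace s [c] new = s.flatMap (fun x => if x = c then new else [x]) := by
  rw [PySem.Chars.replace]
  simp only [List.isEmpty_cons, Bool.false_eq_true, if_false]
  exact pv_go_single c new s s.length [] le_rfl

lemma pv_lowerChar_idem (c : Char) :
    PySem.Chars.lowerChar (PySem.Chars.lowerChar c) = PySem.Chars.lowerChar c := by
  unfold PySem.Chars.lowerChar PySem.Chars.isupper
  split_ifs with h1 h2
  · exfalso
    simp only [Bool.and_eq_true, decide_eq_true_eq] at h1 h2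
    have h65 : (65:Nat) ≤ c.toNat := by
      have := Fin.mk_le_mk.mp h1.1
      simpa [show ('A':Char).toNat = 65 from by decide] using this
    have h90 : c.toNat ≤ 90 := by
      have := Fin.mk_le_mk.mp h1.2
      simpa [show ('Z':Char).toNat = 90 from by decide] using this
    have hv : (Char.ofNat (c.toNat + 32)).toNat = c.toNat + 32 := by
      rw [Char.toNat_ofNat, if_pos]
      left; omega
    have h2' : (Char.ofNat (c.toNat + 32)).toNat ≤ 90 := Fin.mk_le_mk.mp h2.2
    rw [hv] at h2'
    omega
  · rfl
  · rfl

lemma pv_strip_idem (l : List Char) :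
    PySem.Chars.strip (PySem.Chars.strip l) = PySem.Chars.strip l := by
  show PySem.Chars.rstrip (PySem.Chars.lstrip (PySem.Chars.rstrip (PySem.Chars.lstrip l)))
      = PySem.Chars.rstrip (PySem.Chars.lstrip l)
  have hr : ∀ x : List Char, PySem.Chars.rstrip x = List.rdropWhile PySem.Chars.isspace x := by
    intro x; rfl
  have hl : ∀ x : List Char, PySem.Chars.lstrip x = List.dropWhile PySem.Chars.isspace x := by
    intro x; rfl
  simp only [hr, hl]
  set p := PySem.Chars.isspace
  have key : List.dropWhile p (List.rdropWhile p (List.dropWhile p l))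
      = List.rdropWhile p (List.dropWhile p l) := by
    rw [List.dropWhile_eq_self_iff]
    intro hl0
    have hpre := List.rdropWhile_prefix (p := p) (l := List.dropWhile p l)
    have hlen : 0 < (List.dropWhile p l).length :=
      lt_of_lt_of_le hl0 hpre.length_le
    have hget := hpre.getElem hl0
    rw [hget]
    exact List.dropWhile_get_zero_not p l hlen
  rw [key, List.rdropWhile_idempotent]

-- the single-character replace maps used by A's normalize chain
def pvRep (c r : Char) (x : Char) : List Char := if x = c then [r] else [x]
def pvDel (c : Char) (x : Char) : List Char := if x = c then [] else [x]

-- A's normalize chain collapses to one character pass: normalize_text = pvNorm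
lemma pv_normChar_chain (c : Char) :
    ((((([PySem.Chars.lowerChar c].flatMap (pvRep '-' ' ')).flatMap (pvRep '–' ' ')).flatMap
        (pvRep '—' ' ')).flatMap (pvRep '’' '\'')).flatMap (pvDel '.')).flatMap (pvDel ',')
      = pvNormChar c := by
  unfold pvNormChar
  set d := PySem.Chars.lowerChar c with hd
  by_cases h1 : d = '-'
  · simp [h1, pvRep, pvDel]
  · by_cases h2 : d = '–'
    · simp [h2, pvRep, pvDel]
    · by_cases h3 : d = '—'
      · simp [h3, pvRep, pvDel]
      · by_cases h4 : d = '’'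
        · simp [h4, pvRep, pvDel]
        · by_cases h5 : d = '.'
          · simp [h1, h2, h3, h4, h5, pvRep, pvDel]
          · by_cases h6 : d = ','
            · simp [h1, h2, h3, h4, h5, h6, pvRep, pvDel]
            · simp [h1, h2, h3, h4, h5, h6, pvRep, pvDel]

lemma pv_normalize_eq (s : String) :
    (normalize_text s).toList = pvNorm s.toList := by
  unfold normalize_text pvNorm
  simp only [PySem.Str.toList_strip, PySem.Str.toList_replace, PySem.Str.toList_lower]
  rw [show ("-" : String).toList = ['-'] from rfl, show (" " : String).toList = [' '] from rfl,
      show ("–" : String).toList = ['–'] from rfl, show ("—" : String).toList = ['—'] from rfl,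
      show ("’" : String).toList = ['’'] from rfl, show ("'" : String).toList = ['\''] from rfl,
      show ("." : String).toList = ['.'] from rfl, show ("," : String).toList = [','] from rfl]
  rw [pv_replace_single, pv_replace_single, pv_replace_single, pv_replace_single,
      pv_replace_single, pv_replace_single]
  congr 1
  rw [show PySem.Chars.lower s.toList = s.toList.map PySem.Chars.lowerChar from rfl]
  rw [List.flatMap_map]
  simp only [List.flatMap_assoc]
  apply List.flatMap_congr
  intro c _
  have := pv_normChar_chain c
  simpa [List.flatMap_assoc] using this


-- pvNorm is invariant under each of A's pre-passes
lemma pv_pvNorm_strip_idem (l : List Char) :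
    PySem.Chars.strip (pvNorm l) = pvNorm l := pv_strip_idem _

lemma pv_pvNormChar_lower (c : Char) :
    pvNormChar (PySem.Chars.lowerChar c) = pvNormChar c := by
  unfold pvNormChar
  rw [pv_lowerChar_idem]

lemma pv_pvNorm_lower (l : List Char) :
    pvNorm (PySem.Chars.lower l) = pvNorm l := by
  unfold pvNorm PySem.Chars.lower
  rw [List.flatMap_map]
  congr 1
  exact List.flatMap_congr (fun c _ => pv_pvNormChar_lower c)

lemma pv_pvNorm_rep (c r : Char) (h : pvNormChar c = pvNormChar r) (l : List Char) :
    pvNorm (l.flatMap (pvRep c r)) = pvNorm l := by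
  unfold pvNorm
  rw [List.flatMap_assoc]
  congr 1
  apply List.flatMap_congr
  intro x _
  unfold pvRep
  by_cases hx : x = c
  · simp [hx, h]
  · simp [hx]

lemma pv_pvNorm_del (c : Char) (h : pvNormChar c = []) (l : List Char) :
    pvNorm (l.flatMap (pvDel c)) = pvNorm l := by
  unfold pvNorm
  rw [List.flatMap_assoc]
  congr 1
  apply List.flatMap_congr
  intro x _
  unfold pvDel
  by_cases hx : x = c
  · simp [hx, h]
  · simp [hx]

lemma pv_replace_rep (l : List Char) (c r : Char) :
    PySem.Chars.replace l [c] [r] = l.flatMap (pvRep c r) := by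
  rw [pv_replace_single]; rfl

lemma pv_replace_del (l : List Char) (c : Char) :
    PySem.Chars.replace l [c] [] = l.flatMap (pvDel c) := by
  rw [pv_replace_single]; rfl

lemma pv_flatMap_del_filter (l : List Char) (c : Char) :
    l.flatMap (pvDel c) = l.filter (· ≠ c) := by
  induction l with
  | nil => rfl
  | cons x t ih =>
      by_cases hx : x = c <;> simp [pvDel, hx, ih]

-- A's dedup loop body, named so the fold can be evaluated one step at a time
def pvBody (st : List String × PySem.Set String) (al0 : String) : List String × PySem.Set String :=
  let a := PySem.Str.strip (normalize_text al0)
  if a ≠ "" ∧ ¬ (PySem.Set.contains st.2 a = true) then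
    (st.1 ++ [a], PySem.Set.add st.2 a)
  else st

lemma pvBody_skip (st : List String × PySem.Set String) (al0 : String)
    (h : PySem.Str.strip (normalize_text al0) = "") : pvBody st al0 = st := by
  unfold pvBody
  rw [h, if_neg]
  intro hc
  exact hc.1 rfl

lemma pvBody_mem (st : List String × PySem.Set String) (al0 a : String)
    (h : PySem.Str.strip (normalize_text al0) = a)
    (hmem : PySem.Set.contains st.2 a = true) : pvBody st al0 = st := by
  unfold pvBody
  rw [h, if_neg]
  intro hc
  exact hc.2 hmem

lemma pvBody_new (st : List String × PySem.Set String) (al0 a : String)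
    (h : PySem.Str.strip (normalize_text al0) = a) (ha : a ≠ "")
    (hmem : ¬ PySem.Set.contains st.2 a = true) :
    pvBody st al0 = (st.1 ++ [a], PySem.Set.add st.2 a) := by
  unfold pvBody
  rw [h, if_pos ⟨ha, hmem⟩]

-- the eight normalized alias candidates collapse to two strings
set_option maxHeartbeats 2000000 in
lemma pv_aliases_collapse (brand : String) :
    (brand_aliases brand).map String.toList
      = (PySem.List.dedup
          [pvNorm (PySem.Chars.strip brand.toList),
           pvNorm ((PySem.Chars.strip brand.toList).filter (· ≠ '+'))]).filter (· ≠ []) := by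
  set bl := PySem.Chars.strip brand.toList with hbl
  set N := pvNorm bl with hN
  set NP := pvNorm (bl.filter (· ≠ '+')) with hNP
  have hb : (PySem.Str.strip brand).toList = bl := by
    rw [hbl, PySem.Str.toList_strip]
  -- string-level values of the eight normalized aliases
  have e1 : PySem.Str.strip (normalize_text (PySem.Str.strip brand)) = String.ofList N := by
    apply String.toList_inj.mp
    rw [PySem.Str.toList_strip, pv_normalize_eq, hb, String.toList_ofList]
    exact pv_pvNorm_strip_idem bl
  have e2 : PySem.Str.strip (normalize_text (PySem.Str.lower (PySem.Str.strip brand)))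
      = String.ofList N := by
    apply String.toList_inj.mp
    rw [PySem.Str.toList_strip, pv_normalize_eq, String.toList_ofList,
        PySem.Str.toList_lower, hb, pv_pvNorm_lower]
    exact pv_pvNorm_strip_idem bl
  have e3 : PySem.Str.strip (normalize_text (PySem.Str.replace (PySem.Str.strip brand) "-" " "))
      = String.ofList N := by
    apply String.toList_inj.mp
    rw [PySem.Str.toList_strip, pv_normalize_eq, String.toList_ofList,
        PySem.Str.toList_replace, hb,
        show ("-" : String).toList = ['-'] from rfl,
        show (" " : String).toList = [' '] from rfl,
        pv_replace_rep, pv_pvNorm_rep '-' ' ' (by decide)]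
    exact pv_pvNorm_strip_idem bl
  have e4 : PySem.Str.strip (normalize_text (PySem.Str.replace (PySem.Str.strip brand) "–" " "))
      = String.ofList N := by
    apply String.toList_inj.mp
    rw [PySem.Str.toList_strip, pv_normalize_eq, String.toList_ofList,
        PySem.Str.toList_replace, hb,
        show ("–" : String).toList = ['–'] from rfl,
        show (" " : String).toList = [' '] from rfl,
        pv_replace_rep, pv_pvNorm_rep '–' ' ' (by decide)]
    exact pv_pvNorm_strip_idem bl
  have e5 : PySem.Str.strip (normalize_text (PySem.Str.replace (PySem.Str.strip brand) "—" " "))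
      = String.ofList N := by
    apply String.toList_inj.mp
    rw [PySem.Str.toList_strip, pv_normalize_eq, String.toList_ofList,
        PySem.Str.toList_replace, hb,
        show ("—" : String).toList = ['—'] from rfl,
        show (" " : String).toList = [' '] from rfl,
        pv_replace_rep, pv_pvNorm_rep '—' ' ' (by decide)]
    exact pv_pvNorm_strip_idem bl
  have e6 : PySem.Str.strip (normalize_text (PySem.Str.replace (PySem.Str.strip brand) "’" "'"))
      = String.ofList N := by
    apply String.toList_inj.mp
    rw [PySem.Str.toList_strip, pv_normalize_eq, String.toList_ofList,
        PySem.Str.toList_replace, hb,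
        show ("’" : String).toList = ['’'] from rfl,
        show ("'" : String).toList = ['\''] from rfl,
        pv_replace_rep, pv_pvNorm_rep '’' '\'' (by decide)]
    exact pv_pvNorm_strip_idem bl
  have e7 : PySem.Str.strip (normalize_text (PySem.Str.replace (PySem.Str.strip brand) "." ""))
      = String.ofList N := by
    apply String.toList_inj.mp
    rw [PySem.Str.toList_strip, pv_normalize_eq, String.toList_ofList,
        PySem.Str.toList_replace, hb,
        show ("." : String).toList = ['.'] from rfl,
        show ("" : String).toList = [] from rfl,
        pv_replace_del, pv_pvNorm_del '.' (by decide)]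
    exact pv_pvNorm_strip_idem bl
  have e8 : PySem.Str.strip (normalize_text (PySem.Str.replace (PySem.Str.strip brand) "+" ""))
      = String.ofList NP := by
    apply String.toList_inj.mp
    rw [PySem.Str.toList_strip, pv_normalize_eq, String.toList_ofList,
        PySem.Str.toList_replace, hb,
        show ("+" : String).toList = ['+'] from rfl,
        show ("" : String).toList = [] from rfl,
        pv_replace_del, pv_flatMap_del_filter, hNP]
    exact pv_pvNorm_strip_idem (bl.filter (· ≠ '+'))
  have hfold : brand_aliases brand =
      ([PySem.Str.strip brand, PySem.Str.lower (PySem.Str.strip brand),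
        PySem.Str.replace (PySem.Str.strip brand) "-" " ",
        PySem.Str.replace (PySem.Str.strip brand) "–" " ",
        PySem.Str.replace (PySem.Str.strip brand) "—" " ",
        PySem.Str.replace (PySem.Str.strip brand) "’" "'",
        PySem.Str.replace (PySem.Str.strip brand) "." "",
        PySem.Str.replace (PySem.Str.strip brand) "+" ""].foldl pvBody
        ([], PySem.Set.empty)).1 := rfl
  have hSN : (String.ofList N = "") ↔ N = [] := by
    constructor
    · intro h; have := congrArg String.toList h; simpa using this
    · intro h; rw [h]
  have hSNP : (String.ofList NP = "") ↔ NP = [] := by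
    constructor
    · intro h; have := congrArg String.toList h; simpa using this
    · intro h; rw [h]
  have hEqS : (String.ofList NP = String.ofList N) ↔ NP = N := by
    constructor
    · intro h; have := congrArg String.toList h; simpa using this
    · intro h; rw [h]
  have hce : ∀ x : String, ¬ PySem.Set.contains PySem.Set.empty x = true := by
    intro x
    simp [PySem.Set.contains, PySem.Set.empty]
  rw [hfold]
  by_cases hn : N = []
  · have h1 : String.ofList N = "" := hSN.mpr hn
    have k1 := pvBody_skip ([], PySem.Set.empty) _ (e1.trans h1)
    have k2 := pvBody_skip ([], PySem.Set.empty) _ (e2.trans h1)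
    have k3 := pvBody_skip ([], PySem.Set.empty) _ (e3.trans h1)
    have k4 := pvBody_skip ([], PySem.Set.empty) _ (e4.trans h1)
    have k5 := pvBody_skip ([], PySem.Set.empty) _ (e5.trans h1)
    have k6 := pvBody_skip ([], PySem.Set.empty) _ (e6.trans h1)
    have k7 := pvBody_skip ([], PySem.Set.empty) _ (e7.trans h1)
    rw [List.foldl_cons, k1, List.foldl_cons, k2, List.foldl_cons, k3, List.foldl_cons, k4,
        List.foldl_cons, k5, List.foldl_cons, k6, List.foldl_cons, k7, List.foldl_cons]
    by_cases hp : NP = []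
    · rw [pvBody_skip ([], PySem.Set.empty) _ (e8.trans (hSNP.mpr hp))]
      simp [PySem.List.dedup, PySem.Set.ofList, PySem.Set.add, PySem.Set.contains,
            PySem.Set.empty, hn, hp]
    · rw [pvBody_new ([], PySem.Set.empty) _ _ e8 (fun h => hp (hSNP.mp h)) (hce _)]
      simp [PySem.List.dedup, PySem.Set.ofList, PySem.Set.add, PySem.Set.contains,
            PySem.Set.empty, hn, hp]
  · have hn' : String.ofList N ≠ "" := fun h => hn (hSN.mp h)
    have k1 : pvBody ([], PySem.Set.empty) (PySem.Str.strip brand)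
        = ([String.ofList N], [String.ofList N]) := by
      rw [pvBody_new ([], PySem.Set.empty) _ _ e1 hn' (hce _)]
      simp [PySem.Set.add, PySem.Set.contains, PySem.Set.empty]
    have hc1 : PySem.Set.contains ([String.ofList N] : List String) (String.ofList N) = true := by
      simp [PySem.Set.contains]
    have k2 := pvBody_mem ([String.ofList N], [String.ofList N]) _ _ e2 hc1
    have k3 := pvBody_mem ([String.ofList N], [String.ofList N]) _ _ e3 hc1
    have k4 := pvBody_mem ([String.ofList N], [String.ofList N]) _ _ e4 hc1
    have k5 := pvBody_mem ([String.ofList N], [String.ofList N]) _ _ e5 hc1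
    have k6 := pvBody_mem ([String.ofList N], [String.ofList N]) _ _ e6 hc1
    have k7 := pvBody_mem ([String.ofList N], [String.ofList N]) _ _ e7 hc1
    rw [List.foldl_cons, k1, List.foldl_cons, k2, List.foldl_cons, k3, List.foldl_cons, k4,
        List.foldl_cons, k5, List.foldl_cons, k6, List.foldl_cons, k7, List.foldl_cons]
    by_cases he : NP = N
    · rw [pvBody_mem ([String.ofList N], [String.ofList N]) _ _ e8
          (by rw [hEqS.mpr he]; exact hc1)]
      simp [PySem.List.dedup, PySem.Set.ofList, PySem.Set.add, PySem.Set.contains,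
            PySem.Set.empty, hn, he]
    · have he' : String.ofList NP ≠ String.ofList N := fun h => he (hEqS.mp h)
      by_cases hp : NP = []
      · rw [pvBody_skip ([String.ofList N], [String.ofList N]) _ (e8.trans (hSNP.mpr hp))]
        simp [PySem.List.dedup, PySem.Set.ofList, PySem.Set.add, PySem.Set.contains,
              PySem.Set.empty, hn, he, hp]
      · have hc2 : ¬ PySem.Set.contains ([String.ofList N] : List String)
            (String.ofList NP) = true := by
          simp [PySem.Set.contains, he']
        rw [pvBody_new ([String.ofList N], [String.ofList N]) _ _ e8
            (fun h => hp (hSNP.mp h)) hc2]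
        simp [PySem.List.dedup, PySem.Set.ofList, PySem.Set.add, PySem.Set.contains,
              PySem.Set.empty, hn, he, hp]


-- A's loop body on the Chars side
def pvStep (t : List Char) (fp : Option Int) (a : List Char) : Option Int :=
  let pos := PySem.Chars.find t a
  if pos ≠ -1 then
    match fp with
    | none => some pos
    | some v => if pos < v then some pos else fp
  else fp

lemma pvStep_char (t a : List Char) (acc : Option Int) :
    pvStep t acc a =
      if PySem.Chars.find t a = -1 then acc
      else
        match acc with
        | none => some (PySem.Chars.find t a)
        | some v => some (min (PySem.Chars.find t a) v) := by
  cases acc <;> simp only [pvStep] <;> split_ifs <;> simp_all [min_def] <;> omega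

lemma pvStep_none_iff (t a : List Char) (acc : Option Int) :
    pvStep t acc a = none ↔ acc = none ∧ PySem.Chars.find t a = -1 := by
  rw [pvStep_char]; cases acc <;> split_ifs <;> simp_all

lemma pvFold_none (t : List Char) (al : List (List Char)) : ∀ (acc : Option Int),
    al.foldl (pvStep t) acc = none ↔ acc = none ∧ ∀ a ∈ al, PySem.Chars.find t a = -1 := by
  induction al with
  | nil => simp
  | cons a al ih =>
      intro acc
      rw [List.foldl_cons, ih, pvStep_none_iff, List.forall_mem_cons]
      tauto

lemma pvFold_some (t : List Char) (al : List (List Char)) : ∀ (acc : Option Int) (r : Int),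
    al.foldl (pvStep t) acc = some r →
    (acc = some r ∨ ∃ a ∈ al, PySem.Chars.find t a = r ∧ PySem.Chars.find t a ≠ -1) ∧
    (∀ v, acc = some v → r ≤ v) ∧
    (∀ a ∈ al, PySem.Chars.find t a ≠ -1 → r ≤ PySem.Chars.find t a) := by
  induction al with
  | nil =>
      intro acc r h
      simp only [List.foldl_nil] at h
      refine ⟨Or.inl h, ?_, by simp⟩
      intro v hv
      rw [h] at hv
      rw [Option.some_inj.mp hv]
  | cons a al ih =>
      intro acc r h
      rw [List.foldl_cons] at h
      obtain ⟨h1, h2, h3⟩ := ih _ r h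
      rw [pvStep_char] at h1 h2
      by_cases hf : PySem.Chars.find t a = -1
      · rw [if_pos hf] at h1 h2
        refine ⟨?_, h2, ?_⟩
        · rcases h1 with h1 | ⟨b, hb, hh⟩
          · exact Or.inl h1
          · exact Or.inr ⟨b, List.mem_cons_of_mem _ hb, hh⟩
        · rw [List.forall_mem_cons]
          exact ⟨fun hne => absurd hf hne, h3⟩
      · rw [if_neg hf] at h1 h2
        cases acc with
        | none =>
            refine ⟨?_, by simp, ?_⟩
            · rcases h1 with h1 | ⟨b, hb, hh⟩
              · exact Or.inr ⟨a, List.mem_cons_self, (Option.some_inj.mp h1), hf⟩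
              · exact Or.inr ⟨b, List.mem_cons_of_mem _ hb, hh⟩
            · rw [List.forall_mem_cons]
              exact ⟨fun _ => h2 _ rfl, h3⟩
        | some v =>
            have hrm : r ≤ min (PySem.Chars.find t a) v := h2 _ rfl
            refine ⟨?_, ?_, ?_⟩
            · rcases h1 with h1 | ⟨b, hb, hh⟩
              · have h1' := Option.some_inj.mp h1
                rcases le_total (PySem.Chars.find t a) v with hle | hle
                · exact Or.inr ⟨a, List.mem_cons_self,
                    by rw [min_eq_left hle] at h1'; exact h1', hf⟩
                · exact Or.inl (by rw [min_eq_right hle] at h1'; rw [h1'])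
              · exact Or.inr ⟨b, List.mem_cons_of_mem _ hb, hh⟩
            · intro w hw
              rw [← Option.some_inj.mp hw]
              exact le_trans hrm (min_le_right _ _)
            · rw [List.forall_mem_cons]
              exact ⟨fun _ => le_trans hrm (min_le_left _ _), h3⟩

lemma pvScan_none (al : List (List Char)) (hal : ∀ a ∈ al, a ≠ []) :
    ∀ (t : List Char) (i : Int),
    pvScan al t i = none ↔ ∀ a ∈ al, ¬ a <:+: t := by
  intro t
  induction t with
  | nil =>
      intro i
      simp only [pvScan]
      constructor
      · intro _ a ha hinf
        exact hal a ha (List.infix_nil.mp hinf)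
      · intro _; trivial
  | cons c rest ih =>
      intro i
      simp only [pvScan]
      split_ifs with hc
      · simp only [List.any_eq_true] at hc
        obtain ⟨a, ha, hp⟩ := hc
        constructor
        · intro h; exact absurd h (by simp)
        · intro h
          exact absurd ((List.isPrefixOf_iff_prefix.mp hp).isInfix) (h a ha)
      · rw [ih]
        simp only [List.any_eq_true, not_exists, not_and] at hc
        constructor
        · intro h a ha hinf
          rcases List.infix_cons_iff.mp hinf with hpre | hinf'
          · exact absurd (List.isPrefixOf_iff_prefix.mpr hpre) (by simpa using hc a ha)
          · exact h a ha hinf'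
        · intro h a ha hinf'
          exact h a ha (List.infix_cons_iff.mpr (Or.inr hinf'))

lemma pvScan_some (al : List (List Char)) :
    ∀ (t : List Char) (i x : Int), pvScan al t i = some x →
    ∃ k : Nat, x = i + k ∧ (∃ a ∈ al, a <+: t.drop k) ∧
      ∀ j < k, ¬ ∃ a ∈ al, a <+: t.drop j := by
  intro t
  induction t with
  | nil => intro i x h; simp [pvScan] at h
  | cons c rest ih =>
      intro i x h
      simp only [pvScan] at h
      split_ifs at h with hc
      · obtain rfl : x = i := by exact (Option.some_inj.mp h).symm
        refine ⟨0, by omega, ?_, by omega⟩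
        simp only [List.any_eq_true] at hc
        obtain ⟨a, ha, hp⟩ := hc
        exact ⟨a, ha, by simpa using List.isPrefixOf_iff_prefix.mp hp⟩
      · obtain ⟨k, hk, hm, hmin⟩ := ih (i + 1) x h
        refine ⟨k + 1, by omega, by simpa using hm, ?_⟩
        intro j hj hex
        match j with
        | 0 =>
            obtain ⟨a, ha, hp⟩ := hex
            simp only [List.drop_zero] at hp
            exact hc (List.any_eq_true.mpr ⟨a, ha, List.isPrefixOf_iff_prefix.mpr hp⟩)
        | j + 1 =>
            exact hmin j (by omega) (by simpa using hex)

-- prefix at a position implies the alias is an infix of the text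
lemma pv_prefix_drop_infix {a t : List Char} {j : Nat} (h : a <+: t.drop j) : a <:+: t :=
  h.isInfix.trans (t.drop_suffix j).isInfix

-- a match at position j is not below the alias's own first occurrence
lemma pv_find_le_of_prefix_drop {a t : List Char} {j : Nat} (h : a <+: t.drop j) :
    PySem.Chars.find t a ≤ (j : Int) := by
  have hinf : a <:+: t := pv_prefix_drop_infix h
  have h0 : 0 ≤ PySem.Chars.find t a := (PySem.Chars.find_nonneg_iff _ _).mpr hinf
  have hspec := PySem.Chars.find_spec h0
  by_contra hlt
  exact hspec.2 j (by omega) h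

-- the running-minimum fold and the left-to-right scan agree
lemma pvMain (t : List Char) (al : List (List Char)) (hal : ∀ a ∈ al, a ≠ []) :
    al.foldl (pvStep t) none = pvScan al t 0 := by
  by_cases hall : ∀ a ∈ al, ¬ a <:+: t
  · rw [(pvScan_none al hal t 0).mpr hall, (pvFold_none t al none).mpr]
    exact ⟨rfl, fun a ha => (PySem.Chars.find_eq_neg_one_iff _ _).mpr (hall a ha)⟩
  · have hA : al.foldl (pvStep t) none ≠ none := by
      intro hcon
      rw [pvFold_none] at hcon
      push_neg at hall
      obtain ⟨a, ha, hinf⟩ := hall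
      exact (PySem.Chars.find_eq_neg_one_iff t a).mp (hcon.2 a ha) hinf
    have hB : pvScan al t 0 ≠ none := by
      intro hcon
      exact hall ((pvScan_none al hal t 0).mp hcon)
    obtain ⟨r, hr⟩ := Option.ne_none_iff_exists'.mp hA
    obtain ⟨x, hx⟩ := Option.ne_none_iff_exists'.mp hB
    rw [hr, hx]
    obtain ⟨h1, _, h3⟩ := pvFold_some t al none r hr
    obtain ⟨a₀, ha₀, hfr, hfne⟩ := h1.resolve_left (by simp)
    have h0r : 0 ≤ r := hfr ▸ (PySem.Chars.find_nonneg_iff _ _).mpr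
      ((PySem.Chars.find_ne_neg_one_iff _ _).mp hfne)
    obtain ⟨k, hk, ⟨a₁, ha₁, hp₁⟩, hmin⟩ := pvScan_some al t 0 x hx
    have hmr : a₀ <+: t.drop r.toNat := by
      have := (PySem.Chars.find_spec (hfr ▸ h0r)).1
      rwa [hfr] at this
    have hkr : ¬ (r.toNat < k) := fun hlt => hmin r.toNat hlt ⟨a₀, ha₀, hmr⟩
    have hrk : r ≤ (k : Int) := by
      have hle := pv_find_le_of_prefix_drop hp₁
      have hne : PySem.Chars.find t a₁ ≠ -1 := by
        have := (PySem.Chars.find_nonneg_iff _ _).mpr (pv_prefix_drop_infix hp₁)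
        omega
      have := h3 a₁ ha₁ hne
      omega
    have : x = r := by omega
    rw [this]

-- ===== VERDICT (by name: the statement is the Claim_ definition above) =====
theorem find_first_position_spec : Claim_equal_find_first_position := by
  intro answer brand _
  unfold Spec_find_first_position find_first_position find_first_position_alt
  show List.foldl _ none (brand_aliases brand)
      = pvScan ((PySem.List.dedup
          [pvNorm (PySem.Chars.strip brand.toList),
           pvNorm ((PySem.Chars.strip brand.toList).filter (· ≠ '+'))]).filter (· ≠ []))
        (pvNorm answer.toList) 0
  have hAL := pv_aliases_collapse brand
  have hal2 : ∀ a ∈ (brand_aliases brand).map String.toList, a ≠ [] := by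
    rw [hAL]
    intro a ha
    simpa using (List.mem_filter.mp ha).2
  have hmain := pvMain (pvNorm answer.toList) _ hal2
  rw [List.foldl_map] at hmain
  rw [← hAL, ← hmain]
  apply PySem.List.foldl_congr_mem
  intro acc x _
  simp [pvStep, PySem.Str.find_eq, pv_normalize_eq]
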